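-- pv_equiv track=rewrite | github.com/wlkaqw/python | 9(重制版).py | func911
-- ===== SOURCE A (Python) =====
-- def inz(n):
--     count=0
--     for i in range(1,n+1):
--         if n%i==0:
--             count+=1
--     return count
--
-- def func911(tp):
--     if not tp:
--         return ()
--     dic={}
--     for i in tp:
--         dic[inz(i)]=dic.get(inz(i),[])+[i]
--         dic[inz(i)].sort()
--     return tuple(sorted(dic.items(), key=lambda x: -x[0]))
-- ===== SOURCE B (Python) =====
-- def _divcount(n):
--     # number of divisors of n in 1..n (0 for n <= 0), by trial division up to sqrt(n)
--     if n <= 0: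
--         return 0
--     c = 0
--     d = 1
--     while d * d <= n:
--         if n % d == 0:
--             c += 1 if d * d == n else 2
--         d += 1
--     return c
--
-- def func911(tp):
--     if not tp:
--         return ()
--     groups = {}
--     for x in tp:
--         groups.setdefault(_divcount(x), []).append(x)
--     return tuple((k, sorted(groups[k])) for k in sorted(groups, reverse=True))
-- ===== Notes on version B (the rewrite author's own statement) =====
-- stated objective: faster
-- what changed: Divisor counts are computed by trial division up to sqrt(n) (counting divisor pairs) instead of scanning all of 1..n, and groups are appended unsorted and sorted once at the end instead of re-sorting after every insertion.
import Mathlib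
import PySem

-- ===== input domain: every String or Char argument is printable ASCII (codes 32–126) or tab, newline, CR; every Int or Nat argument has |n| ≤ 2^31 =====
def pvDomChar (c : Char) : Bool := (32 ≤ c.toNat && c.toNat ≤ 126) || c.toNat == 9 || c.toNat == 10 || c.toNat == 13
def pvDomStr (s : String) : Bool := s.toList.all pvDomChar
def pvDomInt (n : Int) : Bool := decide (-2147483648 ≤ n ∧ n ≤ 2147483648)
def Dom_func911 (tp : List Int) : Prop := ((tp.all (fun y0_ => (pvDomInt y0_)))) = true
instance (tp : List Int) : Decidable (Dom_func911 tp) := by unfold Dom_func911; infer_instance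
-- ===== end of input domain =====

-- B replaces A's O(n) divisor scan by trial division up to sqrt(n) (counting divisor
-- pairs) and sorts each group once at the end instead of after every insertion: faster.


-- ===== PORT A =====
-- inz(n): count i in range(1, n+1) with n % i == 0
def pyInz (n : Int) : Int :=
  (PySem.List.pyRange 1 (n + 1) 1).foldl
    (fun count i => if PySem.Int.mod n i == 0 then count + 1 else count) 0

def func911 (tp : List Int) : List (Int × List Int) :=
  if tp = [] then []
  else
    let dic := tp.foldl (fun d i =>
      let d' := d.insert (pyInz i) (d.getD (pyInz i) [] ++ [i])
      -- dic[inz(i)].sort() sorts the stored list in place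
      d'.insert (pyInz i) (PySem.List.sorted (d'.getD (pyInz i) []) (fun x => x) false))
      PySem.Dict.empty
    PySem.List.sorted dic.items (fun x => -x.1) false

-- ===== PORT B =====
-- the 'while d*d <= n' trial-division loop of _divcount
def divLoop (n : Int) (c : Int) (d : Int) : Int :=
  if d * d ≤ n then
    divLoop n (if PySem.Int.mod n d == 0 then (if d * d == n then c + 1 else c + 2) else c) (d + 1)
  else c
termination_by (n + 1 - d).toNat
decreasing_by
  have hdn : d ≤ n := by nlinarith [sq_nonneg (d - 1), sq_nonneg d]
  omega

def pyDivcount (n : Int) : Int :=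
  if n ≤ 0 then 0 else divLoop n 0 1

def func911_alt (tp : List Int) : List (Int × List Int) :=
  if tp = [] then []
  else
    let g := tp.foldl (fun d x => d.modify (pyDivcount x) [] (fun v => v ++ [x]))
      PySem.Dict.empty
    (PySem.List.sorted g.keys (fun k => k) true).map
      (fun k => (k, PySem.List.sorted (g.getD k []) (fun x => x) false))

-- ===== PRECONDITION & SPEC =====
def Spec_func911 (tp : List Int) (out : List (Int × List Int)) : Prop := out = func911_alt tp
instance (tp : List Int) (out : List (Int × List Int)) : Decidable (Spec_func911 tp out) := by unfold Spec_func911; infer_instance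

-- ===== CLAIM (what is proved, stated in full; the proofs are below) =====
def Claim_equal_func911 : Prop := ∀ (tp : List Int), Dom_func911 tp → Spec_func911 tp (func911 tp)

-- ===== LEMMAS AND PROOFS =====

theorem listsum_finsum (n : Nat) (f : Nat → Int) : ((List.range n).map f).sum = ∑ k ∈ Finset.range n, f k := by
  induction n with
  | zero => simp
  | succ n ih => rw [List.range_succ, Finset.sum_range_succ, List.map_append, List.sum_append, ih]; simp
theorem countP_card (n : Nat) (q : Nat → Bool) :
    (List.range n).countP q = ((Finset.range n).filter (fun k => q k = true)).card := by
  induction n with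
  | zero => simp
  | succ n ih => rw [List.range_succ, Finset.range_add_one, List.countP_append, Finset.filter_insert, ih]
                 by_cases h : q n = true <;> simp [h, Finset.card_insert_of_notMem]

def wN (m e : Nat) : Int := if e ∣ m then (if e * e = m then 1 else 2) else 0

theorem core (m : Nat) (hm : 1 ≤ m) :
    ((((Finset.Icc 1 m).filter (fun e => e ∣ m)).card : Int)) =
      ∑ e ∈ Finset.Icc 1 (Nat.sqrt m), wN m e := by
  set s := Nat.sqrt m with hs
  have hm0 : m ≠ 0 := by omega
  set A := (Finset.Icc 1 m).filter (fun e => e ∣ m) with hA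
  set S := (Finset.Icc 1 s).filter (fun e => e ∣ m) with hS
  set Seq := S.filter (fun e => e * e = m) with hSeq
  set Slt := S.filter (fun e => ¬ e * e = m) with hSlt
  set L := A.filter (fun e => ¬ e ≤ s) with hL
  -- small divisors of A are S
  have h1 : A.filter (fun e => e ≤ s) = S := by
    ext e
    simp only [hA, hS, Finset.mem_filter, Finset.mem_Icc]
    constructor
    · rintro ⟨⟨⟨h1, h2⟩, hd⟩, hle⟩; exact ⟨⟨h1, hle⟩, hd⟩
    · rintro ⟨⟨h1, hle⟩, hd⟩
      exact ⟨⟨⟨h1, Nat.le_of_dvd (by omega) hd⟩, hd⟩, hle⟩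
  have h2 : S.card + L.card = A.card := by
    rw [← h1, hL]; exact Finset.card_filter_add_card_filter_not _
  -- bijection between large divisors and small divisors with e*e < m
  have h3 : L.card = Slt.card := by
    apply Finset.card_bij' (i := fun e _ => m / e) (j := fun d _ => m / d)
    · intro e he
      simp only [hL, hA, Finset.mem_filter, Finset.mem_Icc] at he
      obtain ⟨⟨⟨he1, he2⟩, hd⟩, hgt⟩ := he
      have hgt' : s < e := by omega
      set d := m / e with hd'
      have hmul : e * d = m := Nat.mul_div_cancel' hd
      have hd1 : 1 ≤ d := (Nat.one_le_div_iff (by omega)).mpr he2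
      have hlt : m < (s + 1) * (s + 1) := Nat.lt_succ_sqrt m
      have hde : d < e := by nlinarith
      have hddlt : d * d < m := by nlinarith
      simp only [hSlt, hS, Finset.mem_filter, Finset.mem_Icc]
      exact ⟨⟨⟨hd1, Nat.le_sqrt.mpr (Nat.le_of_lt hddlt)⟩, Nat.div_dvd_of_dvd hd⟩, by omega⟩
    · intro d hdm
      simp only [hSlt, hS, Finset.mem_filter, Finset.mem_Icc] at hdm
      obtain ⟨⟨⟨hd1, hds⟩, hd⟩, hne⟩ := hdm
      set e := m / d with he'
      have hmul : d * e = m := Nat.mul_div_cancel' hd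
      have hdd : d * d ≤ m := Nat.le_sqrt.mp hds
      have hddlt : d * d < m := by omega
      have hde : d < e := by nlinarith
      have he1 : 1 ≤ e := by nlinarith
      have hse : s < e := by
        by_contra hc
        have hc' : e ≤ Nat.sqrt m := by omega
        have : e * e ≤ m := Nat.le_sqrt.mp hc'
        nlinarith
      simp only [hL, hA, Finset.mem_filter, Finset.mem_Icc]
      refine ⟨⟨⟨he1, Nat.le_of_dvd (by omega) (Nat.div_dvd_of_dvd hd)⟩, Nat.div_dvd_of_dvd hd⟩, by omega⟩
    · intro e he
      simp only [hL, hA, Finset.mem_filter, Finset.mem_Icc] at he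
      exact Nat.div_div_self he.1.2 hm0
    · intro d hdm
      simp only [hSlt, hS, Finset.mem_filter, Finset.mem_Icc] at hdm
      exact Nat.div_div_self hdm.1.2 hm0
  -- the weighted sum counts Seq once and Slt twice
  have h4 : ∑ e ∈ Finset.Icc 1 s, wN m e = (Seq.card : Int) + 2 * (Slt.card : Int) := by
    have e1 : ∑ e ∈ Finset.Icc 1 s, wN m e
        = ∑ e ∈ S, (if e * e = m then (1 : Int) else 2) := by
      rw [hS, Finset.sum_filter]
      apply Finset.sum_congr rfl
      intro e _
      rfl
    rw [e1, ← Finset.sum_filter_add_sum_filter_not S (fun e => e * e = m)]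
    rw [← hSeq, ← hSlt]
    have e2 : ∑ e ∈ Seq, (if e * e = m then (1 : Int) else 2) = (Seq.card : Int) := by
      have hall : ∀ e ∈ Seq, (if e * e = m then (1 : Int) else 2) = 1 := by
        intro e he
        simp only [hSeq, Finset.mem_filter] at he
        simp [he.2]
      rw [Finset.sum_congr rfl hall]
      simp
    have e3 : ∑ e ∈ Slt, (if e * e = m then (1 : Int) else 2) = 2 * (Slt.card : Int) := by
      have hall : ∀ e ∈ Slt, (if e * e = m then (1 : Int) else 2) = 2 := by
        intro e he
        simp only [hSlt, Finset.mem_filter] at he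
        simp [he.2]
      rw [Finset.sum_congr rfl hall]
      simp [mul_comm]
    rw [e2, e3]
  have h5 : Seq.card + Slt.card = S.card := by
    rw [hSeq, hSlt]; exact Finset.card_filter_add_card_filter_not _
  rw [h4]
  have : A.card = Seq.card + Slt.card + Slt.card := by omega
  rw [this]; push_cast; ring

theorem divisor_pairing (m : Nat) (hm : 1 ≤ m) :
    (((List.range m).countP (fun k => decide ((k + 1) ∣ m))) : Int) =
      ((List.range (Nat.sqrt m)).map (fun k => wN m (1 + k))).sum := by
  rw [countP_card, listsum_finsum]
  have hL : ((Finset.range m).filter (fun k => decide ((k + 1) ∣ m) = true)).card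
      = ((Finset.Icc 1 m).filter (fun e => e ∣ m)).card := by
    apply Finset.card_bij' (i := fun k _ => k + 1) (j := fun e _ => e - 1)
    case hi =>
      intro k hk
      simp only [Finset.mem_filter, Finset.mem_range, decide_eq_true_eq] at hk
      simp only [Finset.mem_filter, Finset.mem_Icc]
      exact ⟨⟨by omega, by omega⟩, hk.2⟩
    case hj =>
      intro e he
      simp only [Finset.mem_filter, Finset.mem_Icc] at he
      simp only [Finset.mem_filter, Finset.mem_range, decide_eq_true_eq]
      constructor
      · omega
      · have : e - 1 + 1 = e := by omega
        rw [this]; exact he.2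
    case left_inv => intro k _; omega
    case right_inv =>
      intro e he
      simp only [Finset.mem_filter, Finset.mem_Icc] at he
      omega
  have hR : ∑ k ∈ Finset.range (Nat.sqrt m), wN m (1 + k) = ∑ e ∈ Finset.Icc 1 (Nat.sqrt m), wN m e := by
    apply Finset.sum_bij' (i := fun k _ => 1 + k) (j := fun e _ => e - 1)
    case hi =>
      intro k hk
      simp only [Finset.mem_range] at hk
      simp only [Finset.mem_Icc]; omega
    case hj =>
      intro e he
      simp only [Finset.mem_Icc] at he
      simp only [Finset.mem_range]; omega
    case left_neg => intro k _; omega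
    case right_neg =>
      intro e he
      simp only [Finset.mem_Icc] at he; omega
    case h => intro k _; rfl
  rw [hL, hR]
  exact core m hm

theorem divLoop_spec (m : Nat) (t : Nat) : ∀ (d : Nat), Nat.sqrt m + 1 - d = t → 1 ≤ d → ∀ (c : Int),
    divLoop (m : Int) c (d : Int) =
      c + (((List.range t).map (fun k => wN m (d + k))).sum) := by
  induction t with
  | zero =>
    intro d ht hd c
    have hgt : Nat.sqrt m < d := by omega
    have hmlt : m < d * d := Nat.sqrt_lt.mp hgt
    rw [divLoop]
    have hcond : ¬ ((d : Int) * (d : Int) ≤ (m : Int)) := by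
      exact_mod_cast not_le.mpr (by exact_mod_cast hmlt)
    simp [hcond]
  | succ t ih =>
    intro d ht hd c
    have hle : d ≤ Nat.sqrt m := by omega
    have hdd : d * d ≤ m := Nat.le_sqrt.mp hle
    rw [divLoop]
    have hcond : ((d : Int) * (d : Int) ≤ (m : Int)) := by exact_mod_cast hdd
    rw [if_pos hcond]
    have harg : (if PySem.Int.mod (m : Int) (d : Int) == 0 then
        (if (d : Int) * (d : Int) == (m : Int) then c + 1 else c + 2) else c) = c + wN m d := by
      have hdvd : (PySem.Int.mod (m : Int) (d : Int) == 0) = decide (d ∣ m) := by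
        rw [Bool.eq_iff_iff]
        simp only [beq_iff_eq, PySem.Int.mod_eq_zero_iff_dvd, Int.natCast_dvd_natCast,
          decide_eq_true_eq]
      have hsq : ((d : Int) * (d : Int) == (m : Int)) = decide (d * d = m) := by
        rw [Bool.eq_iff_iff]
        simp only [beq_iff_eq, decide_eq_true_eq]
        constructor
        · intro h; exact_mod_cast h
        · intro h; exact_mod_cast h
      rw [hdvd, hsq]
      simp only [wN]
      by_cases h1 : d ∣ m <;> by_cases h2 : d * d = m <;> simp [h1, h2]
    rw [harg]
    have hcast : ((d : Int) + 1) = ((d + 1 : Nat) : Int) := by push_cast; ring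
    rw [hcast, ih (d + 1) (by omega) (by omega)]
    rw [List.range_succ_eq_map]
    simp only [List.map_cons, List.map_map, List.sum_cons]
    have hmapeq : (List.map ((fun k => wN m (d + k)) ∘ Nat.succ) (List.range t))
        = List.map (fun k => wN m (d + 1 + k)) (List.range t) := by
      apply List.map_congr_left
      intro k _
      simp only [Function.comp]
      congr 1
      omega
    rw [hmapeq]
    simp only [Nat.add_zero]
    ring

theorem divcount_eq_inz (n : Int) : pyDivcount n = pyInz n := by
  by_cases hn : n ≤ 0
  · have hr : PySem.List.pyRange 1 (n + 1) 1 = [] := PySem.List.pyRange_one_eq_nil (by omega)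
    simp [pyDivcount, pyInz, hn, hr]
  · have hn0 : 0 < n := by omega
    set m := n.toNat with hm
    have hmn : (m : Int) = n := by omega
    have hm1 : 1 ≤ m := by omega
    have htn : ((n : Int) + 1 - 1).toNat = m := by omega
    have hA : pyInz n = ((List.range m).countP (fun k => decide ((k + 1) ∣ m)) : Int) := by
      rw [pyInz, PySem.List.foldl_if_add_one (p := fun i => PySem.Int.mod n i == 0),
        PySem.List.pyRange_one, List.countP_map, htn]
      simp only [zero_add]
      congr 1
      apply List.countP_congr
      intro k _
      simp only [Function.comp_apply, beq_iff_eq, PySem.Int.mod_eq_zero_iff_dvd,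
        decide_eq_true_eq]
      rw [← hmn, show (1 : Int) + (k : Int) = ((1 + k : Nat) : Int) by push_cast; ring,
        Int.natCast_dvd_natCast, Nat.add_comm 1 k]
    have hB : pyDivcount n = ((List.range (Nat.sqrt m)).map (fun k => wN m (1 + k))).sum := by
      rw [pyDivcount, if_neg (by omega), ← hmn,
        show (1 : Int) = ((1 : Nat) : Int) from rfl,
        divLoop_spec m (Nat.sqrt m) 1 (by omega) (by omega)]
      simp
    rw [hA, hB]
    exact (divisor_pairing m hm1).symm

theorem sorted_append_sorted (v : List Int) (x : Int) :
    PySem.List.sorted (PySem.List.sorted v (fun y => y) false ++ [x]) (fun y => y) false =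
      PySem.List.sorted (v ++ [x]) (fun y => y) false := by
  exact PySem.List.sorted_eq_sorted_of_perm _ _ _ (fun a b h => h)
    ((PySem.List.sorted_perm v (fun y => y) false).append_right [x])

theorem B_fold_getD (l : List Int) (k : Int) :
    (l.foldl (fun d x => d.modify (pyInz x) [] (fun v => v ++ [x]))
        PySem.Dict.empty).getD k [] = l.filter (fun x => pyInz x == k) := by
  have h : l.foldl (fun d x => d.modify (pyInz x) [] (fun v => v ++ [x])) PySem.Dict.empty
      = (l.map (fun x => (pyInz x, x))).foldl
          (fun d p => d.modify p.1 [] (fun v => v ++ [p.2])) PySem.Dict.empty := by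
    rw [List.foldl_map]
  rw [h, PySem.Dict.getD_foldl_modify_append, PySem.Dict.getD_empty]
  simp [List.filter_map, Function.comp_def]

theorem A_fold_getD (l : List Int) (k : Int) :
    (l.foldl (fun d i => d.insert (pyInz i)
        (PySem.List.sorted (d.getD (pyInz i) [] ++ [i]) (fun x => x) false))
        PySem.Dict.empty).getD k [] =
      PySem.List.sorted (l.filter (fun x => pyInz x == k)) (fun x => x) false := by
  induction l using List.reverseRecOn with
  | nil => simp [PySem.Dict.getD_empty, PySem.List.sorted]
  | append_singleton l x ih =>
    rw [List.foldl_append, List.foldl_cons, List.foldl_nil, List.filter_append]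
    by_cases h : pyInz x = k
    · subst h
      rw [PySem.Dict.getD_insert_self, ih, sorted_append_sorted]
      simp
    · rw [PySem.Dict.getD_insert_of_ne _ _ _ (Ne.symm h), ih]
      simp [h]

theorem func911_eq_alt (tp : List Int) : func911 tp = func911_alt tp := by
  by_cases htp : tp = []
  · subst htp; simp [func911, func911_alt]
  · have hdc : pyDivcount = pyInz := funext divcount_eq_inz
    simp only [func911, func911_alt, hdc, if_neg htp]
    have hfold : tp.foldl (fun d i =>
        let d' := d.insert (pyInz i) (d.getD (pyInz i) [] ++ [i])
        d'.insert (pyInz i) (PySem.List.sorted (d'.getD (pyInz i) []) (fun x => x) false))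
        PySem.Dict.empty
        = tp.foldl (fun d i => d.insert (pyInz i)
            (PySem.List.sorted (d.getD (pyInz i) [] ++ [i]) (fun x => x) false))
            PySem.Dict.empty := by
      apply PySem.List.foldl_congr_mem
      intro acc x _
      simp [PySem.Dict.getD_insert_self, PySem.Dict.insert_insert_self]
    rw [hfold]
    set dicA := tp.foldl (fun d i => d.insert (pyInz i)
        (PySem.List.sorted (d.getD (pyInz i) [] ++ [i]) (fun x => x) false))
        PySem.Dict.empty with hdicA
    set g := tp.foldl (fun d x => d.modify (pyInz x) [] (fun v => v ++ [x]))
        PySem.Dict.empty with hg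
    have nodupA : dicA.keys.Nodup := by
      rw [hdicA]
      exact PySem.Dict.nodup_keys_foldl_insert_key tp pyInz _ _ (by simp [PySem.Dict.keys_empty])
    have nodupK : g.keys.Nodup := by
      rw [hg]
      exact PySem.Dict.nodup_keys_foldl_modify_key tp pyInz [] _ _ (by simp [PySem.Dict.keys_empty])
    have keysEq : dicA.keys = g.keys := by
      rw [hdicA, hg, PySem.Dict.keys_foldl_insert_key, PySem.Dict.keys_foldl_modify_key]
    have itemsA : dicA.items = g.keys.map
        (fun k => (k, PySem.List.sorted (g.getD k []) (fun x => x) false)) := by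
      rw [PySem.Dict.items_eq_map_keys dicA nodupA [], keysEq]
      apply List.map_congr_left
      intro k _
      rw [hdicA, hg, A_fold_getD, B_fold_getD]
    apply PySem.List.sorted_eq_of_perm_of_pairwise_lt
    · rw [itemsA]
      exact (PySem.List.sorted_perm g.keys (fun k => k) true).map _
    · rw [List.pairwise_map]
      have h1 := PySem.List.sorted_pairwise_rev g.keys (fun k => k)
      have h2 : (PySem.List.sorted g.keys (fun k => k) true).Nodup :=
        ((PySem.List.sorted_perm g.keys (fun k => k) true).nodup_iff).mpr nodupK
      exact (h1.and h2).imp (fun h => by omega)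

-- ===== VERDICT (by name: the statement is the Claim_ definition above) =====
theorem func911_spec : Claim_equal_func911 := by
  intro tp _
  unfold Spec_func911
  exact func911_eq_alt tp
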